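-- pv_equiv track=rewrite | github.com/vasizaf/Multidimensional-Data-Structures | quadtree.py | filter_by_categorical_inputs
-- ===== SOURCE A (Python) =====
-- def filter_by_categorical_inputs(results, categorical_inputs, attribute_indices):
--     """Filter results based on categorical conditions."""
--     filtered_results = []
--     for result in results:
--         match = True
--         for attr, values in categorical_inputs.items():
--             idx = attribute_indices[attr]
--             dataset_value = str(result[idx]).strip().lower()  # Normalize dataset value
--             search_values = [val.strip().lower() for val in values]  # Normalize search values
--             if dataset_value not in search_values:
--                 match = False
--                 break
--         if match:
--             filtered_results.append(result)
--     return filtered_results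
-- ===== SOURCE B (Python) =====
-- def filter_by_categorical_inputs(results, categorical_inputs, attribute_indices):
--     """Filter results by categorical conditions, narrowing one attribute at a time."""
--     filtered = list(results)
--     for attr, values in categorical_inputs.items():
--         vs = {v.strip().lower() for v in values}
--         filtered = [r for r in filtered
--                     if str(r[attribute_indices[attr]]).strip().lower() in vs]
--     return filtered
-- ===== Notes on version B (the rewrite author's own statement) =====
-- stated objective: alternative
-- what changed: A makes one pass over rows with an inner per-row attribute loop (re-normalizing the search values for every row) and an early break; B instead narrows the row list once per attribute, building each attribute's normalized value set a single time and filtering the surviving rows with it.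
-- outside the precondition, e.g. on filter_by_categorical_inputs([['x']], {'a': ['y'], 'b': ['x']}, {'a': 0}): A returns [], B returns []
import Mathlib
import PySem

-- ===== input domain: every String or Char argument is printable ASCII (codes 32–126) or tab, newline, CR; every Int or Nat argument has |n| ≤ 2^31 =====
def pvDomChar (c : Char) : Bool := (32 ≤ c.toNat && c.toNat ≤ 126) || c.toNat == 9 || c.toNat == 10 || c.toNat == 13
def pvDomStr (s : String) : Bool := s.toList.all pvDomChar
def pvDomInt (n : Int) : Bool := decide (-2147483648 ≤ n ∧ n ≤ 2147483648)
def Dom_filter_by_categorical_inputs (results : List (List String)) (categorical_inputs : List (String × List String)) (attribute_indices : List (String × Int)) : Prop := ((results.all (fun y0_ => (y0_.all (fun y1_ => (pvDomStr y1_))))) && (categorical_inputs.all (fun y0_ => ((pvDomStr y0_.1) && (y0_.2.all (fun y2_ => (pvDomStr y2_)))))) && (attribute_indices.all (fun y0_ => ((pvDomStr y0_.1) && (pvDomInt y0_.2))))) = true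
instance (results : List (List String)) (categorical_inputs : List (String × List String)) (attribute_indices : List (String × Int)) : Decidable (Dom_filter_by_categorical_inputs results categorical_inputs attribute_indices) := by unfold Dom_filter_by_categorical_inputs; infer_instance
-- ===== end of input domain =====

-- B narrows the row list once per attribute with a normalized value set built a single time,
-- instead of A's per-row inner attribute loop with an early break (objective: alternative).


-- ===== PORT A =====
-- shared helper: s.strip().lower()
def pvNorm (s : String) : String := PySem.Str.lower (PySem.Str.strip s)

-- A's inner 'for attr, values in categorical_inputs.items():' loop over one row, with the
-- early 'break' (some false) and exceptions as none (KeyError from attribute_indices[attr],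
-- IndexError from result[idx])
def pvRowMatchA (row : List String) (cis : List (String × List String)) (ai : List (String × Int)) : Option Bool :=
  match cis with
  | [] => some true
  | (attr, values) :: rest =>
    match (PySem.Dict.mk ai).get? attr with
    | none => none
    | some idx =>
      match PySem.List.pyGet? row idx with
      | none => none
      | some dv =>
        let dataset_value := pvNorm dv
        let search_values := values.map pvNorm
        if search_values.contains dataset_value then pvRowMatchA row rest ai
        else some false

-- A's outer 'for result in results:' loop building filtered_results
def pvLoopA (rows : List (List String)) (cis : List (String × List String)) (ai : List (String × Int)) : Option (List (List String)) :=
  match rows with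
  | [] => some []
  | r :: rs =>
    match pvRowMatchA r cis ai with
    | none => none
    | some b => (pvLoopA rs cis ai).map (fun t => if b then r :: t else t)

def filter_by_categorical_inputs (results : List (List String)) (categorical_inputs : List (String × List String)) (attribute_indices : List (String × Int)) : List (List String) :=
  (pvLoopA results categorical_inputs attribute_indices).getD []

-- ===== PORT B =====
-- B's comprehension '[r for r in filtered if str(r[attribute_indices[attr]]).strip().lower() in vs]';
-- the attribute_indices[attr] lookup happens per row, so an empty 'filtered' raises nothing
def pvStepB (ai : List (String × Int)) (attr : String) (vs : PySem.Set String) (filtered : List (List String)) : Option (List (List String)) :=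
  match filtered with
  | [] => some []
  | r :: rs =>
    match (PySem.Dict.mk ai).get? attr with
    | none => none
    | some idx =>
      match PySem.List.pyGet? r idx with
      | none => none
      | some dv =>
        (pvStepB ai attr vs rs).map (fun t => if PySem.Set.contains vs (pvNorm dv) then r :: t else t)

-- B's 'for attr, values in categorical_inputs.items():' loop rebinding filtered
def pvLoopB (cis : List (String × List String)) (ai : List (String × Int)) (filtered : List (List String)) : Option (List (List String)) :=
  match cis with
  | [] => some filtered
  | (attr, values) :: rest =>
    let vs := PySem.Set.ofList (values.map pvNorm)
    match pvStepB ai attr vs filtered with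
    | none => none
    | some f => pvLoopB rest ai f

def filter_by_categorical_inputs_alt (results : List (List String)) (categorical_inputs : List (String × List String)) (attribute_indices : List (String × Int)) : List (List String) :=
  (pvLoopB categorical_inputs attribute_indices results).getD []

-- ===== PRECONDITION & SPEC =====
-- Pre_ excludes inputs where some requested attribute is missing from attribute_indices or its
-- index is out of range for some row: there A raises KeyError/IndexError — except on some inputs
-- where every row already fails an earlier attribute and A's break returns early; those are also
-- excluded (Pre_ is slightly narrower than "A returns"), and B returns the same value there.
def Pre_filter_by_categorical_inputs (results : List (List String)) (categorical_inputs : List (String × List String)) (attribute_indices : List (String × Int)) : Prop :=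
  ∀ p ∈ categorical_inputs, ∀ row ∈ results,
    (((PySem.Dict.mk attribute_indices).get? p.1).bind (fun idx => PySem.List.pyGet? row idx)).isSome = true
instance (results : List (List String)) (categorical_inputs : List (String × List String)) (attribute_indices : List (String × Int)) : Decidable (Pre_filter_by_categorical_inputs results categorical_inputs attribute_indices) := by unfold Pre_filter_by_categorical_inputs; infer_instance

def pvWitness_filter_by_categorical_inputs : List (List String) × (List (String × List String)) × (List (String × Int)) :=
  ([[" A ", "x"], ["b", "y"]], [("attr", ["a", "C"])], [("attr", 0)])

def Spec_filter_by_categorical_inputs (results : List (List String)) (categorical_inputs : List (String × List String)) (attribute_indices : List (String × Int)) (out : List (List String)) : Prop := out = filter_by_categorical_inputs_alt results categorical_inputs attribute_indices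
instance (results : List (List String)) (categorical_inputs : List (String × List String)) (attribute_indices : List (String × Int)) (out : List (List String)) : Decidable (Spec_filter_by_categorical_inputs results categorical_inputs attribute_indices out) := by unfold Spec_filter_by_categorical_inputs; infer_instance

-- ===== CLAIM (what is proved, stated in full; the proofs are below) =====
def Claim_equal_filter_by_categorical_inputs : Prop := ∀ (results : List (List String)) (categorical_inputs : List (String × List String)) (attribute_indices : List (String × Int)), Dom_filter_by_categorical_inputs results categorical_inputs attribute_indices → Pre_filter_by_categorical_inputs results categorical_inputs attribute_indices → Spec_filter_by_categorical_inputs results categorical_inputs attribute_indices (filter_by_categorical_inputs results categorical_inputs attribute_indices)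

-- ===== LEMMAS AND PROOFS =====

-- proof-only predicate: row passes the (attr, values) condition (false also if a lookup fails)
def pvOk (ai : List (String × Int)) (row : List String) (p : String × List String) : Bool :=
  match ((PySem.Dict.mk ai).get? p.1).bind (fun idx => PySem.List.pyGet? row idx) with
  | none => false
  | some dv => (p.2.map pvNorm).contains (pvNorm dv)

lemma pvRowMatchA_eq (row : List String) (cis : List (String × List String)) (ai : List (String × Int))
    (h : ∀ p ∈ cis, (((PySem.Dict.mk ai).get? p.1).bind (fun idx => PySem.List.pyGet? row idx)).isSome = true) :
    pvRowMatchA row cis ai = some (cis.all (pvOk ai row)) := by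
  induction cis with
  | nil => rfl
  | cons p rest ih =>
    obtain ⟨attr, values⟩ := p
    have h0 := h (attr, values) (List.mem_cons_self)
    cases hg : (PySem.Dict.mk ai).get? attr with
    | none => simp [hg] at h0
    | some idx =>
      cases hv : PySem.List.pyGet? row idx with
      | none => simp [hg, hv] at h0
      | some dv =>
        simp only [pvRowMatchA, hg, hv]
        have hok : pvOk ai row (attr, values) = (values.map pvNorm).contains (pvNorm dv) := by
          simp [pvOk, hg, hv]
        by_cases hc : ∃ a ∈ values, pvNorm a = pvNorm dv
        · have hcb : (values.map pvNorm).contains (pvNorm dv) = true := by simpa using hc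
          rw [if_pos hcb, ih (fun q hq => h q (List.mem_cons_of_mem _ hq))]
          simp only [List.all_cons, hok, hcb, Bool.true_and]
        · have hcb : (values.map pvNorm).contains (pvNorm dv) = false := by simpa using hc
          rw [if_neg (by simp only [hcb]; exact Bool.false_ne_true)]
          simp only [List.all_cons, hok, hcb, Bool.false_and]

lemma pvLoopA_eq (rows : List (List String)) (cis : List (String × List String)) (ai : List (String × Int))
    (h : ∀ p ∈ cis, ∀ row ∈ rows, (((PySem.Dict.mk ai).get? p.1).bind (fun idx => PySem.List.pyGet? row idx)).isSome = true) :
    pvLoopA rows cis ai = some (rows.filter (fun r => cis.all (pvOk ai r))) := by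
  induction rows with
  | nil => rfl
  | cons r rs ih =>
    simp only [pvLoopA]
    rw [pvRowMatchA_eq r cis ai (fun p hp => h p hp r List.mem_cons_self),
        ih (fun p hp row hrow => h p hp row (List.mem_cons_of_mem _ hrow))]
    by_cases hb : cis.all (pvOk ai r) = true
    · simp [hb]
    · have hb' : cis.all (pvOk ai r) = false := by simpa using hb
      simp [hb']

lemma pvSet_contains_ofList (l : List String) (x : String) :
    PySem.Set.contains (PySem.Set.ofList l) x = l.contains x := by
  by_cases hx : x ∈ l
  · simp [PySem.Set.contains_eq_listContains, hx, PySem.Set.mem_ofList]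
  · simp [PySem.Set.contains_eq_listContains, hx, PySem.Set.mem_ofList]

lemma pvStepB_eq (ai : List (String × Int)) (attr : String) (values : List String) (filtered : List (List String))
    (h : ∀ row ∈ filtered, (((PySem.Dict.mk ai).get? attr).bind (fun idx => PySem.List.pyGet? row idx)).isSome = true) :
    pvStepB ai attr (PySem.Set.ofList (values.map pvNorm)) filtered
      = some (filtered.filter (fun r => pvOk ai r (attr, values))) := by
  induction filtered with
  | nil => rfl
  | cons r rs ih =>
    have h0 := h r List.mem_cons_self
    cases hg : (PySem.Dict.mk ai).get? attr with
    | none => simp [hg] at h0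
    | some idx =>
      cases hv : PySem.List.pyGet? r idx with
      | none => simp [hg, hv] at h0
      | some dv =>
        simp only [pvStepB, hg, hv]
        rw [ih (fun row hrow => h row (List.mem_cons_of_mem _ hrow))]
        have hok : pvOk ai r (attr, values) = (values.map pvNorm).contains (pvNorm dv) := by
          simp [pvOk, hg, hv]
        rw [pvSet_contains_ofList]
        by_cases hc : ∃ a ∈ values, pvNorm a = pvNorm dv
        · have hcb : (values.map pvNorm).contains (pvNorm dv) = true := by simpa using hc
          simp only [List.filter_cons, hok, hcb]
          simp
        · have hcb : (values.map pvNorm).contains (pvNorm dv) = false := by simpa using hc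
          simp only [List.filter_cons, hok, hcb]
          simp

lemma pvLoopB_eq (cis : List (String × List String)) (ai : List (String × Int)) (filtered : List (List String))
    (h : ∀ p ∈ cis, ∀ row ∈ filtered, (((PySem.Dict.mk ai).get? p.1).bind (fun idx => PySem.List.pyGet? row idx)).isSome = true) :
    pvLoopB cis ai filtered = some (filtered.filter (fun r => cis.all (pvOk ai r))) := by
  induction cis generalizing filtered with
  | nil => simp [pvLoopB]
  | cons p rest ih =>
    obtain ⟨attr, values⟩ := p
    have hstep := pvStepB_eq ai attr values filtered (fun row hrow => h (attr, values) List.mem_cons_self row hrow)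
    simp only [pvLoopB, hstep]
    rw [ih (filtered.filter (fun r => pvOk ai r (attr, values)))
        (fun q hq row hrow => h q (List.mem_cons_of_mem _ hq) row (List.mem_of_mem_filter hrow))]
    rw [List.filter_filter]
    congr 1
    apply List.filter_congr
    intro r _
    simp [List.all_cons, Bool.and_comm]

-- ===== VERDICT (by name: the statement is the Claim_ definition above) =====
theorem filter_by_categorical_inputs_spec : Claim_equal_filter_by_categorical_inputs := by
  intro results cis ai _ hpre
  unfold Spec_filter_by_categorical_inputs filter_by_categorical_inputs filter_by_categorical_inputs_alt
  rw [pvLoopA_eq results cis ai hpre, pvLoopB_eq cis ai results hpre]
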